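-- pv_equiv track=rewrite | github.com/InColumi/LearnPy | LearnPy/LearnPy.py | getMaxMin
-- ===== SOURCE A (Python) =====
-- def getMaxMin(numbers: list):
--     sum = 0
--     max = sum
--     min = sum
--     for i in range(len(numbers)):
--         sum += numbers[i] if i % 2 == 0 else -numbers[i]
--         if max < sum:
--             max = sum
--         if min > sum:
--             min = sum
--     return [max,abs(min)]
-- ===== SOURCE B (Python) =====
-- def getMaxMin(numbers: list):
--     signed = [v if i % 2 == 0 else -v for i, v in enumerate(numbers)]
--     prefixes = [0]
--     for v in signed:
--         prefixes.append(prefixes[-1] + v)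
--     return [max(prefixes), abs(min(prefixes))]
-- ===== Notes on version B (the rewrite author's own statement) =====
-- stated objective: alternative
-- what changed: Replaces the fused index loop that tracks sum/max/min in place with a materialized alternating-signed prefix-sum table (0 prepended) aggregated afterwards by the builtin max and min.
import Mathlib
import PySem

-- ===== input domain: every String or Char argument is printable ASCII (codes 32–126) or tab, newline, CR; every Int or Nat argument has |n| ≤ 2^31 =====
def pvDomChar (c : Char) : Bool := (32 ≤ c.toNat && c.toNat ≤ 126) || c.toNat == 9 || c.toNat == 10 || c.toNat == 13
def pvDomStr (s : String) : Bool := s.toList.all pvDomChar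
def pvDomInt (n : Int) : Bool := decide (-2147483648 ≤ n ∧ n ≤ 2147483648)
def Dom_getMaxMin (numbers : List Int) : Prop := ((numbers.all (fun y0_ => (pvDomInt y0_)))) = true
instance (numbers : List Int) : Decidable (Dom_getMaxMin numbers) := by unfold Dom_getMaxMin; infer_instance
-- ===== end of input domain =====

-- B replaces A's fused tracking loop with a signed prefix-sum table aggregated by the builtin max/min afterwards (objective: alternative).

-- ===== PORT A =====
-- literal port of A: index loop over range(len(numbers)); pyGetD is exact here since every i is in range
def getMaxMin (numbers : List Int) : List Int :=
  let st := (PySem.List.pyRange 0 (PySem.List.len numbers) 1).foldl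
    (fun (s : Int × Int × Int) i =>
      let sum := s.1 + (if i % 2 == 0 then PySem.List.pyGetD numbers i 0 else -(PySem.List.pyGetD numbers i 0))
      let mx := if s.2.1 < sum then sum else s.2.1
      let mn := if s.2.2 > sum then sum else s.2.2
      (sum, mx, mn)) (0, 0, 0)
  [st.2.1, |st.2.2|]

-- ===== PORT B =====
-- Source B: signed list comprehension, prefix table starting at [0], builtin max/min (list nonempty, so .getD never fires)
def getMaxMin_alt (numbers : List Int) : List Int :=
  let signed := (PySem.List.enumerate numbers 0).map (fun p => if p.1 % 2 == 0 then p.2 else -p.2)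
  let prefixes := signed.foldl (fun acc v => acc ++ [acc.getLast?.getD 0 + v]) ([0] : List Int)
  [(PySem.List.max? prefixes (fun x => x)).getD 0, |(PySem.List.min? prefixes (fun x => x)).getD 0|]

-- ===== PRECONDITION & SPEC =====
def Spec_getMaxMin (numbers : List Int) (out : List Int) : Prop := out = getMaxMin_alt numbers
instance (numbers : List Int) (out : List Int) : Decidable (Spec_getMaxMin numbers out) := by unfold Spec_getMaxMin; infer_instance

-- ===== CLAIM (what is proved, stated in full; the proofs are below) =====
def Claim_equal_getMaxMin : Prop := ∀ (numbers : List Int), Dom_getMaxMin numbers → Spec_getMaxMin numbers (getMaxMin numbers)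

-- ===== LEMMAS AND PROOFS =====

-- A's loop body (proof-only name for the fused step) and the signed value of index i
def pvStep (s : Int × Int × Int) (v : Int) : Int × Int × Int :=
  (s.1 + v,
   if s.2.1 < s.1 + v then s.1 + v else s.2.1,
   if s.2.2 > s.1 + v then s.1 + v else s.2.2)

def pvSg (numbers : List Int) (i : Int) : Int :=
  if i % 2 == 0 then PySem.List.pyGetD numbers i 0 else -(PySem.List.pyGetD numbers i 0)

-- the tail of the prefix-sum scan starting from running total a
def pvScan (l : List Int) (a : Int) : List Int :=
  match l with
  | [] => []
  | v :: t => (a + v) :: pvScan t (a + v)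

lemma pvIfMax (mx s : Int) : (if mx < s then s else mx) = max mx s := by
  rw [max_def]; split_ifs <;> omega

lemma pvIfMin (mn s : Int) : (if mn > s then s else mn) = min mn s := by
  rw [min_def]; split_ifs <;> omega

-- A's fused fold, projected to the (max, min) components, equals folds of max/min over the scan
lemma pvA_fold (l : List Int) (a mx mn : Int) :
    (l.foldl pvStep (a, mx, mn)).2 = ((pvScan l a).foldl max mx, (pvScan l a).foldl min mn) := by
  induction l generalizing a mx mn with
  | nil => rfl
  | cons v t ih =>
    simp only [List.foldl, pvStep, pvScan, ih]
    rw [pvIfMax, pvIfMin]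

-- B's prefix-table builder appends exactly the scan
lemma pvB_prefixes (l : List Int) (acc : List Int) (a : Int) (h : acc.getLast? = some a) :
    l.foldl (fun acc v => acc ++ [acc.getLast?.getD 0 + v]) acc = acc ++ pvScan l a := by
  induction l generalizing acc a with
  | nil => simp [pvScan]
  | cons v t ih =>
    simp only [List.foldl, pvScan, h, Option.getD_some]
    rw [ih (acc ++ [a + v]) (a + v) (by simp)]
    simp

theorem getMaxMin_spec_aux (numbers : List Int) :
    getMaxMin numbers = getMaxMin_alt numbers := by
  change
    [((PySem.List.pyRange 0 (PySem.List.len numbers) 1).foldl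
        (fun s i => pvStep s (pvSg numbers i)) (0, 0, 0)).2.1,
     |((PySem.List.pyRange 0 (PySem.List.len numbers) 1).foldl
        (fun s i => pvStep s (pvSg numbers i)) (0, 0, 0)).2.2|] = getMaxMin_alt numbers
  rw [← List.foldl_map, pvA_fold]
  unfold getMaxMin_alt
  rw [PySem.List.enumerate_eq_map_pyRange (d := 0), List.map_map]
  dsimp only
  rw [show ((fun p : Int × Int => if p.1 % 2 == 0 then p.2 else -p.2) ∘
        (fun j => (j, PySem.List.pyGetD numbers j 0))) = pvSg numbers from rfl]
  rw [pvB_prefixes _ [0] 0 rfl, List.singleton_append]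
  rw [PySem.List.max?_id_cons, PySem.List.min?_id_cons]
  rfl

-- ===== VERDICT (by name: the statement is the Claim_ definition above) =====
theorem getMaxMin_spec : Claim_equal_getMaxMin := by
  intro numbers _
  unfold Spec_getMaxMin
  exact getMaxMin_spec_aux numbers
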